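-- pv_equiv track=rewrite | github.com/Naivedyasingh/JobHub_v2 | screens/hire_dashboard.py | calculate_application_stats
-- ===== SOURCE A (Python) =====
-- def calculate_application_stats(applications):
--     """Calculate application statistics for dashboard metrics."""
--     pending_apps = len([app for app in applications if app.get("status") == "pending"])
--     accepted_apps = len([app for app in applications if app.get("status") == "accepted"])
--
--     return {
--         'total_applications': len(applications),
--         'pending_applications': pending_apps,
--         'accepted_applications': accepted_apps
--     }
-- ===== SOURCE B (Python) =====
-- def calculate_application_stats(applications):
--     """One tabulating pass: frequency table of statuses, then constant-time lookups."""
--     counts = {}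
--     for app in applications:
--         s = app.get("status")
--         counts[s] = counts.get(s, 0) + 1
--     return {
--         'total_applications': len(applications),
--         'pending_applications': counts.get('pending', 0),
--         'accepted_applications': counts.get('accepted', 0)
--     }
-- ===== Notes on version B (the rewrite author's own statement) =====
-- stated objective: alternative
-- what changed: Replaces A's two filtered list scans (one per status) by a single pass that builds a status frequency table, from which pending/accepted counts are read with defaulted lookups.
import Mathlib
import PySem

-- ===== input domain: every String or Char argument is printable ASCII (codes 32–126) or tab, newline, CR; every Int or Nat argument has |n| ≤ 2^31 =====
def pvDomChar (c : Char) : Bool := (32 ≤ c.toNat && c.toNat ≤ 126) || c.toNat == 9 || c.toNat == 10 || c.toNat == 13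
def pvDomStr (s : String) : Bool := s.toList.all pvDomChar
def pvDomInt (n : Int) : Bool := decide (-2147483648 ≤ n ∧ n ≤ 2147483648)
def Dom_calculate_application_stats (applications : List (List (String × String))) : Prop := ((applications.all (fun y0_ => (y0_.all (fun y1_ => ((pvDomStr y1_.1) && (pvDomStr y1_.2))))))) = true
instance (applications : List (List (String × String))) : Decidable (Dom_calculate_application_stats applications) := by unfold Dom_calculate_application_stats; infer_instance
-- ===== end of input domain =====

-- B replaces A's two filtered scans by one frequency-table pass with defaulted lookups (alternative decomposition, same O(n)).


-- ===== PORT A =====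
-- app.get("status") : first-match lookup in the association list (Python dict)
def pvStatusGet (app : List (String × String)) : Option String :=
  (PySem.Dict.mk app).get? "status"

def calculate_application_stats (applications : List (List (String × String))) : List (String × Int) :=
  let pending_apps : Int := ((applications.filter (fun app => pvStatusGet app == some "pending")).length : Int)
  let accepted_apps : Int := ((applications.filter (fun app => pvStatusGet app == some "accepted")).length : Int)
  [("total_applications", (applications.length : Int)),
   ("pending_applications", pending_apps),
   ("accepted_applications", accepted_apps)]

-- ===== PORT B =====
def calculate_application_stats_alt (applications : List (List (String × String))) : List (String × Int) :=
  let counts : PySem.Dict (Option String) Int :=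
    applications.foldl (fun d app =>
      let s := pvStatusGet app
      d.insert s (d.getD s 0 + 1)) PySem.Dict.empty
  [("total_applications", (applications.length : Int)),
   ("pending_applications", counts.getD (some "pending") 0),
   ("accepted_applications", counts.getD (some "accepted") 0)]

-- ===== PRECONDITION & SPEC =====
def Spec_calculate_application_stats (applications : List (List (String × String))) (out : List (String × Int)) : Prop := out = calculate_application_stats_alt applications
instance (applications : List (List (String × String))) (out : List (String × Int)) : Decidable (Spec_calculate_application_stats applications out) := by unfold Spec_calculate_application_stats; infer_instance

-- ===== CLAIM (what is proved, stated in full; the proofs are below) =====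
def Claim_equal_calculate_application_stats : Prop := ∀ (applications : List (List (String × String))), Dom_calculate_application_stats applications → Spec_calculate_application_stats applications (calculate_application_stats applications)

-- ===== LEMMAS AND PROOFS =====
-- B's frequency table read at a status v gives exactly A's filtered count.
lemma pv_counts_getD (applications : List (List (String × String))) (v : Option String) :
    (applications.foldl (fun d app =>
        let s := pvStatusGet app
        d.insert s (d.getD s 0 + 1)) (PySem.Dict.empty : PySem.Dict (Option String) Int)).getD v 0
      = ((applications.filter (fun app => pvStatusGet app == v)).length : Int) := by
  have h : (applications.foldl (fun d app =>
        let s := pvStatusGet app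
        d.insert s (d.getD s 0 + 1)) (PySem.Dict.empty : PySem.Dict (Option String) Int))
      = ((applications.map pvStatusGet).foldl (fun d s => d.insert s (d.getD s 0 + 1)) PySem.Dict.empty) := by
    rw [List.foldl_map]
  rw [h, PySem.Dict.getD_foldl_insert_add_one, PySem.Dict.getD_empty]
  simp only [List.count_eq_countP, ← List.countP_eq_length_filter, List.countP_map]
  have hc : ((fun x => x == v) ∘ pvStatusGet) = (fun app : List (String × String) => pvStatusGet app == v) := rfl
  rw [hc]
  omega

-- ===== VERDICT (by name: the statement is the Claim_ definition above) =====
theorem calculate_application_stats_spec : Claim_equal_calculate_application_stats := by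
  intro applications _
  show _ = _
  simp only [calculate_application_stats, calculate_application_stats_alt, pv_counts_getD]
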